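-- pv_equiv track=rewrite | github.com/ansonk4/report_gen | src/streamlit/questionnaire_editor.py | insert_and_shift_keys
-- ===== SOURCE A (Python) =====
-- def insert_and_shift_keys(dictionary, new_key, new_value):
--     keys_to_shift = [k for k in dictionary.keys() if k >= new_key]
--     keys_to_shift.sort(reverse=True)
--     for key in keys_to_shift:
--         dictionary[key + 1] = dictionary.pop(key)
--     dictionary[new_key] = new_value
--
--     # Recreate dictionary with sorted keys to maintain order
--     sorted_items = sorted(dictionary.items())
--     dictionary.clear()
--     dictionary.update(sorted_items)
--     return dictionary
-- ===== SOURCE B (Python) =====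
-- def insert_and_shift_keys(dictionary, new_key, new_value):
--     result = []
--     inserted = False
--     for k, v in sorted(dictionary.items()):
--         if not inserted and k >= new_key:
--             result.append((new_key, new_value))
--             inserted = True
--         result.append((k + 1, v) if k >= new_key else (k, v))
--     if not inserted:
--         result.append((new_key, new_value))
--     dictionary.clear()
--     dictionary.update(result)
--     return dictionary
-- ===== Notes on version B (the rewrite author's own statement) =====
-- stated objective: alternative
-- what changed: Replaced the in-place descending pop/shift loop followed by a full re-sort with a single pass over sorted(items) that remaps each key and splices the new entry into its sorted position, then rebuilds the dict once.
import Mathlib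
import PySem

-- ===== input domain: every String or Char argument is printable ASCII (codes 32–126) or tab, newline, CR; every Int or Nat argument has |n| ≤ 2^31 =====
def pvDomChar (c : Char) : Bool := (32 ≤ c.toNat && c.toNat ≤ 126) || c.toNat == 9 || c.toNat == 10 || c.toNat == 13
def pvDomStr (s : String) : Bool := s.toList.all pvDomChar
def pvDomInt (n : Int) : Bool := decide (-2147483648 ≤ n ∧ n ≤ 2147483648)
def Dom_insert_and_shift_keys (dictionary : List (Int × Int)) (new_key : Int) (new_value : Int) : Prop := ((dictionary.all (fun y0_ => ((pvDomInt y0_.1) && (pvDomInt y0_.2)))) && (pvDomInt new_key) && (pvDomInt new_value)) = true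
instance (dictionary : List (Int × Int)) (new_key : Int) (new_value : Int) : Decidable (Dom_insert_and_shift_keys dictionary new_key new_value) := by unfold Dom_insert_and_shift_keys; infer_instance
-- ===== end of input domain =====

-- B replaces A's descending pop/shift loop plus re-sort by one pass over the sorted items that
-- remaps keys and splices the new entry in place (alternative decomposition, same cost).
-- Python A and B mutate `dictionary` in place and return it; the equivalence proved here is
-- about the returned items (both Pythons leave the dict holding exactly the returned items).


-- ===== PORT A =====
def insert_and_shift_keys (dictionary : List (Int × Int)) (new_key : Int) (new_value : Int) : List (Int × Int) :=
  let d : PySem.Dict Int Int := PySem.Dict.mk dictionary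
  let keys_to_shift : List Int := d.keys.filter (fun k => decide (k ≥ new_key))
  let keys_to_shift := PySem.List.sorted keys_to_shift (fun k => k) true
  let d := keys_to_shift.foldl (fun d key =>
    match d.pop? key with
    | some (v, d') => d'.insert (key + 1) v
    | none => d) d       -- pop's KeyError branch is unreachable: every key comes from the dict
  let d := d.insert new_key new_value
  let sorted_items := PySem.List.sorted2 d.items (fun p => p.1) (fun p => p.2)
  ((PySem.Dict.empty : PySem.Dict Int Int).update sorted_items).items

-- ===== PORT B =====
def insert_and_shift_keys_alt (dictionary : List (Int × Int)) (new_key : Int) (new_value : Int) : List (Int × Int) :=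
  let r := (PySem.List.sorted2 (PySem.Dict.mk dictionary).items (fun p => p.1) (fun p => p.2)).foldl
    (fun (acc : List (Int × Int) × Bool) (p : Int × Int) =>
      let acc := if !acc.2 && decide (p.1 ≥ new_key) then (acc.1 ++ [(new_key, new_value)], true) else acc
      (acc.1 ++ [if p.1 ≥ new_key then (p.1 + 1, p.2) else p], acc.2))
    ([], false)
  if r.2 then r.1 else r.1 ++ [(new_key, new_value)]

-- ===== PRECONDITION & SPEC =====
-- Pre_: `dictionary` stands for a Python dict, whose keys are necessarily pairwise distinct;
-- an association list with duplicate keys represents no dict input at all (A itself never raises).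
def Pre_insert_and_shift_keys (dictionary : List (Int × Int)) (new_key : Int) (new_value : Int) : Prop :=
  (dictionary.map (fun p => p.1)).Nodup
instance (dictionary : List (Int × Int)) (new_key : Int) (new_value : Int) : Decidable (Pre_insert_and_shift_keys dictionary new_key new_value) := by unfold Pre_insert_and_shift_keys; infer_instance

def pvWitness_insert_and_shift_keys : (List (Int × Int)) × Int × Int := ([(1, 10), (3, 30)], 2, 99)

def Spec_insert_and_shift_keys (dictionary : List (Int × Int)) (new_key : Int) (new_value : Int) (out : List (Int × Int)) : Prop := out = insert_and_shift_keys_alt dictionary new_key new_value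
instance (dictionary : List (Int × Int)) (new_key : Int) (new_value : Int) (out : List (Int × Int)) : Decidable (Spec_insert_and_shift_keys dictionary new_key new_value out) := by unfold Spec_insert_and_shift_keys; infer_instance

-- ===== CLAIM (what is proved, stated in full; the proofs are below) =====
def Claim_equal_insert_and_shift_keys : Prop := ∀ (dictionary : List (Int × Int)) (new_key : Int) (new_value : Int), Dom_insert_and_shift_keys dictionary new_key new_value → Pre_insert_and_shift_keys dictionary new_key new_value → Spec_insert_and_shift_keys dictionary new_key new_value (insert_and_shift_keys dictionary new_key new_value)

-- ===== LEMMAS AND PROOFS =====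

-- the comparison sorted2 uses on (key, value) pairs, and the strict key order of the results
def pvBefore (a b : Int × Int) : Bool :=
  decide (a.1 < b.1) || !decide (b.1 < a.1) && decide (a.2 < b.2)

-- remapping of one (key, value) pair, exactly as both programs write it
def pvRemap (nk : Int) (p : Int × Int) : Int × Int := if p.1 ≥ nk then (p.1 + 1, p.2) else p

-- the body of A's shift loop
def pvStepA (d : PySem.Dict Int Int) (key : Int) : PySem.Dict Int Int :=
  match d.pop? key with
  | some (v, d') => d'.insert (key + 1) v
  | none => d

-- the body of B's single pass
def pvStepB (nk nv : Int) (acc : List (Int × Int) × Bool) (p : Int × Int) : List (Int × Int) × Bool :=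
  let acc := if !acc.2 && decide (p.1 ≥ nk) then (acc.1 ++ [(nk, nv)], true) else acc
  (acc.1 ++ [if p.1 ≥ nk then (p.1 + 1, p.2) else p], acc.2)

-- the common normal form both programs produce: the relabeled sorted sequence with the new
-- entry spliced in at its sorted position
def pvOut (dict : List (Int × Int)) (nk nv : Int) : List (Int × Int) :=
  let s := PySem.List.sorted2 dict (fun p => p.1) (fun p => p.2)
  s.takeWhile (fun q => !decide (q.1 ≥ nk)) ++
    (nk, nv) :: (s.dropWhile (fun q => !decide (q.1 ≥ nk))).map (pvRemap nk)

lemma pv_A_unfold (dict : List (Int × Int)) (nk nv : Int) :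
    insert_and_shift_keys dict nk nv =
      ((PySem.Dict.empty : PySem.Dict Int Int).update
        (PySem.List.sorted2
          ((((PySem.List.sorted ((PySem.Dict.mk dict).keys.filter (fun k => decide (k ≥ nk))) (fun k => k) true).foldl
              pvStepA (PySem.Dict.mk dict)).insert nk nv).items)
          (fun p => p.1) (fun p => p.2))).items := rfl

lemma pv_B_unfold (dict : List (Int × Int)) (nk nv : Int) :
    insert_and_shift_keys_alt dict nk nv =
      (let r := (PySem.List.sorted2 dict (fun p => p.1) (fun p => p.2)).foldl (pvStepB nk nv) ([], false)
       if r.2 then r.1 else r.1 ++ [(nk, nv)]) := rfl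

lemma pv_sorted2_unfold (xs : List (Int × Int)) :
    PySem.List.sorted2 xs (fun p => p.1) (fun p => p.2) =
      xs.foldl (fun acc x => PySem.List.insertBy pvBefore x acc) [] := rfl

lemma pv_insertBy_nil (x : Int × Int) : PySem.List.insertBy pvBefore x [] = [x] := rfl

lemma pv_insertBy_cons (x y : Int × Int) (ys : List (Int × Int)) :
    PySem.List.insertBy pvBefore x (y :: ys) =
      if pvBefore x y then x :: y :: ys else y :: PySem.List.insertBy pvBefore x ys := rfl

lemma pv_insertBy_perm (x : Int × Int) :
    ∀ l : List (Int × Int), (PySem.List.insertBy pvBefore x l).Perm (x :: l)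
  | [] => by rw [pv_insertBy_nil]
  | y :: ys => by
      rw [pv_insertBy_cons]
      by_cases h : pvBefore x y = true
      · rw [if_pos h]
      · rw [if_neg h]
        exact ((pv_insertBy_perm x ys).cons y).trans (List.Perm.swap x y ys)

lemma pv_insertBy_pairwise (x : Int × Int) :
    ∀ l : List (Int × Int), l.Pairwise (fun a b => a.1 < b.1) → (∀ b ∈ l, b.1 ≠ x.1) →
      (PySem.List.insertBy pvBefore x l).Pairwise (fun a b => a.1 < b.1)
  | [], _, _ => by rw [pv_insertBy_nil]; simp
  | y :: ys, hpw, hne => by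
      rw [List.pairwise_cons] at hpw
      obtain ⟨hy, hys⟩ := hpw
      have hyx : y.1 ≠ x.1 := hne y (by simp)
      rw [pv_insertBy_cons]
      by_cases h : pvBefore x y = true
      · rw [if_pos h, List.pairwise_cons]
        have hxy : x.1 < y.1 := by
          simp only [pvBefore, Bool.or_eq_true, Bool.and_eq_true, Bool.not_eq_true',
            decide_eq_true_eq, decide_eq_false_iff_not] at h
          rcases h with h | ⟨h1, _⟩
          · exact h
          · omega
        constructor
        · intro z hz
          rcases List.mem_cons.mp hz with rfl | hz
          · exact hxy
          · exact hxy.trans (hy z hz)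
        · exact List.pairwise_cons.mpr ⟨hy, hys⟩
      · rw [if_neg h, List.pairwise_cons]
        have hyx' : y.1 < x.1 := by
          by_contra hcon
          have hx : x.1 < y.1 := by omega
          exact h (by
            simp only [pvBefore, Bool.or_eq_true, decide_eq_true_eq]
            exact Or.inl hx)
        constructor
        · intro z hz
          have hz' : z ∈ x :: ys := (pv_insertBy_perm x ys).mem_iff.mp hz
          rcases List.mem_cons.mp hz' with rfl | hz'
          · exact hyx'
          · exact hy z hz'
        · exact pv_insertBy_pairwise x ys hys (fun b hb => hne b (List.mem_cons_of_mem y hb))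

lemma pv_foldl_ins :
    ∀ (xs acc : List (Int × Int)), ((acc ++ xs).map (fun p => p.1)).Nodup →
      acc.Pairwise (fun a b => a.1 < b.1) →
      (xs.foldl (fun acc x => PySem.List.insertBy pvBefore x acc) acc).Perm (acc ++ xs) ∧
      (xs.foldl (fun acc x => PySem.List.insertBy pvBefore x acc) acc).Pairwise (fun a b => a.1 < b.1)
  | [], acc, _, hpw => by
      rw [List.foldl_nil, List.append_nil]
      exact ⟨List.Perm.refl acc, hpw⟩
  | x :: xs, acc, hnd, hpw => by
      rw [List.foldl_cons]
      have hperm1 : (PySem.List.insertBy pvBefore x acc).Perm (acc ++ [x]) :=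
        (pv_insertBy_perm x acc).trans (List.perm_append_singleton x acc).symm
      have hrearr : (acc ++ x :: xs).Perm ((acc ++ [x]) ++ xs) := by
        rw [List.append_assoc, List.singleton_append]
      have hnd' : (((PySem.List.insertBy pvBefore x acc) ++ xs).map (fun p => p.1)).Nodup := by
        refine List.Perm.nodup ?_ hnd
        exact (hrearr.trans ((hperm1.symm).append_right xs)).map (fun p => p.1)
      have hne : ∀ b ∈ acc, b.1 ≠ x.1 := by
        intro b hb hbx
        have h1 : b.1 ∈ acc.map (fun p => p.1) := List.mem_map_of_mem hb
        have h2 : x.1 ∈ (x :: xs).map (fun p => p.1) := by simp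
        rw [List.map_append] at hnd
        exact (List.disjoint_of_nodup_append hnd) h1 (hbx ▸ h2)
      have hpw' := pv_insertBy_pairwise x acc hpw hne
      obtain ⟨ih1, ih2⟩ := pv_foldl_ins xs (PySem.List.insertBy pvBefore x acc) hnd' hpw'
      refine ⟨ih1.trans ?_, ih2⟩
      exact ((hperm1.append_right xs).trans hrearr.symm)

lemma pv_sorted2_perm_pairwise (xs : List (Int × Int)) (h : (xs.map (fun p => p.1)).Nodup) :
    (PySem.List.sorted2 xs (fun p => p.1) (fun p => p.2)).Perm xs ∧
    (PySem.List.sorted2 xs (fun p => p.1) (fun p => p.2)).Pairwise (fun a b => a.1 < b.1) := by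
  rw [pv_sorted2_unfold]
  have := pv_foldl_ins xs [] (by simpa using h) (by simp)
  simpa using this

lemma pv_sorted2_eq_of_perm_of_pairwise (xs ys : List (Int × Int))
    (h : (xs.map (fun p => p.1)).Nodup) (hp : ys.Perm xs)
    (hpw : ys.Pairwise (fun a b => a.1 < b.1)) :
    PySem.List.sorted2 xs (fun p => p.1) (fun p => p.2) = ys := by
  obtain ⟨h1, h2⟩ := pv_sorted2_perm_pairwise xs h
  exact (h1.trans hp.symm).eq_of_pairwise
    (fun (a b : Int × Int) _ _ (hab : a.1 < b.1) (hba : b.1 < a.1) =>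
      absurd (lt_trans hab hba) (lt_irrefl _)) h2 hpw

-- ---------- B side ----------

lemma pv_B_ge (nk nv : Int) :
    ∀ (s : List (Int × Int)) (acc : List (Int × Int)),
      s.foldl (pvStepB nk nv) (acc, true) = (acc ++ s.map (pvRemap nk), true)
  | [], acc => by simp
  | p :: s, acc => by
      rw [List.foldl_cons]
      have hstep : pvStepB nk nv (acc, true) p = (acc ++ [pvRemap nk p], true) := by
        simp [pvStepB, pvRemap]
      rw [hstep, pv_B_ge nk nv s (acc ++ [pvRemap nk p])]
      simp

lemma pv_B_lt (nk nv : Int) :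
    ∀ (s : List (Int × Int)) (acc : List (Int × Int)), (∀ p ∈ s, p.1 < nk) →
      s.foldl (pvStepB nk nv) (acc, false) = (acc ++ s, false)
  | [], acc, _ => by simp
  | p :: s, acc, hlt => by
      rw [List.foldl_cons]
      have hp : p.1 < nk := hlt p (by simp)
      have hge : decide (p.1 ≥ nk) = false := by simp; omega
      have hp' : ¬ (p.1 ≥ nk) := by omega
      have hstep : pvStepB nk nv (acc, false) p = (acc ++ [p], false) := by
        simp [pvStepB, hp']
      rw [hstep, pv_B_lt nk nv s (acc ++ [p]) (fun q hq => hlt q (List.mem_cons_of_mem p hq))]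
      simp

lemma pv_B_out (nk nv : Int) (u w : List (Int × Int))
    (hu : ∀ p ∈ u, p.1 < nk) (hw : ∀ p ∈ w, nk ≤ p.1) :
    (let r := (u ++ w).foldl (pvStepB nk nv) ([], false)
     if r.2 then r.1 else r.1 ++ [(nk, nv)]) = u ++ (nk, nv) :: w.map (pvRemap nk) := by
  rw [List.foldl_append, pv_B_lt nk nv u [] hu]
  cases w with
  | nil => simp
  | cons q w' =>
      have hq : nk ≤ q.1 := hw q (by simp)
      have hge : decide (q.1 ≥ nk) = true := by simp; omega
      rw [List.foldl_cons]
      have hstep : pvStepB nk nv (([] : List (Int × Int)) ++ u, false) q =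
          ((u ++ [(nk, nv)]) ++ [pvRemap nk q], true) := by
        simp [pvStepB, hge, pvRemap]
      rw [hstep, pv_B_ge]
      simp

lemma pv_takeWhile_lt (nk : Int) (s : List (Int × Int)) :
    ∀ p ∈ s.takeWhile (fun q => !decide (q.1 ≥ nk)), p.1 < nk := by
  intro p hp
  have := List.mem_takeWhile_imp hp
  simp only [Bool.not_eq_true', decide_eq_false_iff_not] at this
  omega

lemma pv_dropWhile_ge (nk : Int) :
    ∀ (s : List (Int × Int)), s.Pairwise (fun a b => a.1 < b.1) →
      ∀ p ∈ s.dropWhile (fun q => !decide (q.1 ≥ nk)), nk ≤ p.1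
  | [], _, p, hp => by simp at hp
  | a :: s, hpw, p, hp => by
      rw [List.pairwise_cons] at hpw
      obtain ⟨ha, hs⟩ := hpw
      rw [List.dropWhile_cons] at hp
      by_cases h : (!decide (a.1 ≥ nk)) = true
      · rw [if_pos h] at hp
        exact pv_dropWhile_ge nk s hs p hp
      · rw [if_neg h] at hp
        simp only [Bool.not_eq_true', decide_eq_false_iff_not, not_not, ge_iff_le] at h
        rcases List.mem_cons.mp hp with rfl | hp'
        · exact h
        · exact h.trans (ha p hp').le

lemma pv_B_eq_out (dict : List (Int × Int)) (nk nv : Int)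
    (hpre : (dict.map (fun p => p.1)).Nodup) :
    insert_and_shift_keys_alt dict nk nv = pvOut dict nk nv := by
  obtain ⟨hperm, hpw⟩ := pv_sorted2_perm_pairwise dict hpre
  rw [pv_B_unfold, pvOut]
  have hsplit := List.takeWhile_append_dropWhile
    (p := fun q : Int × Int => !decide (q.1 ≥ nk))
    (l := PySem.List.sorted2 dict (fun p => p.1) (fun p => p.2))
  conv_lhs => rw [← hsplit]
  exact pv_B_out nk nv _ _ (pv_takeWhile_lt nk _) (pv_dropWhile_ge nk _ hpw)

lemma pv_out_pairwise (dict : List (Int × Int)) (nk nv : Int)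
    (hpre : (dict.map (fun p => p.1)).Nodup) :
    (pvOut dict nk nv).Pairwise (fun a b => a.1 < b.1) := by
  obtain ⟨hperm, hpw⟩ := pv_sorted2_perm_pairwise dict hpre
  set s := PySem.List.sorted2 dict (fun p => p.1) (fun p => p.2) with hs
  have hu : ∀ p ∈ s.takeWhile (fun q => !decide (q.1 ≥ nk)), p.1 < nk := pv_takeWhile_lt nk s
  have hw : ∀ p ∈ s.dropWhile (fun q => !decide (q.1 ≥ nk)), nk ≤ p.1 := pv_dropWhile_ge nk s hpw
  have hupw : (s.takeWhile (fun q => !decide (q.1 ≥ nk))).Pairwise (fun a b => a.1 < b.1) :=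
    hpw.sublist (List.takeWhile_sublist _)
  have hwpw : (s.dropWhile (fun q => !decide (q.1 ≥ nk))).Pairwise (fun a b => a.1 < b.1) :=
    hpw.sublist (List.dropWhile_sublist _)
  rw [pvOut]
  rw [List.pairwise_append]
  refine ⟨hupw, ?_, ?_⟩
  · rw [List.pairwise_cons]
    constructor
    · intro q hq
      obtain ⟨p, hp, rfl⟩ := List.mem_map.mp hq
      have := hw p hp
      simp only [pvRemap, ge_iff_le, if_pos this]
      omega
    · rw [List.pairwise_map]
      refine List.Pairwise.imp_of_mem ?_ hwpw
      intro a b ha hb hab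
      have h1 := hw a ha
      have h2 := hw b hb
      simp only [pvRemap, ge_iff_le, if_pos h1, if_pos h2]
      omega
  · intro a ha b hb
    have h1 := hu a ha
    rcases List.mem_cons.mp hb with rfl | hb'
    · exact h1
    · obtain ⟨p, hp, rfl⟩ := List.mem_map.mp hb'
      have h2 := hw p hp
      simp only [pvRemap, ge_iff_le, if_pos h2]
      omega

lemma pv_out_perm (dict : List (Int × Int)) (nk nv : Int)
    (hpre : (dict.map (fun p => p.1)).Nodup) :
    (pvOut dict nk nv).Perm (dict.map (pvRemap nk) ++ [(nk, nv)]) := by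
  obtain ⟨hperm, hpw⟩ := pv_sorted2_perm_pairwise dict hpre
  set s := PySem.List.sorted2 dict (fun p => p.1) (fun p => p.2) with hs
  set u := s.takeWhile (fun q => !decide (q.1 ≥ nk)) with hud
  set w := s.dropWhile (fun q => !decide (q.1 ≥ nk)) with hwd
  have husplit : s = u ++ w := (List.takeWhile_append_dropWhile).symm
  have humap : u.map (pvRemap nk) = u := by
    have h0 : u.map (pvRemap nk) = u.map id := by
      apply List.map_congr_left
      intro p hp
      have := pv_takeWhile_lt nk s p (hud ▸ hp)
      simp only [pvRemap, ge_iff_le, id_eq]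
      rw [if_neg (by omega)]
    simpa using h0
  have h1 : (pvOut dict nk nv).Perm ((u ++ w.map (pvRemap nk)) ++ [(nk, nv)]) := by
    rw [pvOut, List.append_assoc]
    exact List.Perm.append_left u ((List.perm_append_singleton _ _).symm)
  have h2 : (u ++ w.map (pvRemap nk)) = s.map (pvRemap nk) := by
    conv_rhs => rw [husplit]
    rw [List.map_append, humap]
  refine h1.trans ?_
  rw [h2]
  exact (hperm.map (pvRemap nk)).append_right _

-- ---------- A side ----------

lemma pv_erase_items (d : PySem.Dict Int Int) (k : Int) :
    (d.erase k).items = d.items.filter (fun p => !(p.1 == k)) := rfl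

lemma pv_filter_ne_perm :
    ∀ (l : List (Int × Int)) (h v : Int), ((l.map (fun p => p.1)).Nodup) → (h, v) ∈ l →
      ((h, v) :: l.filter (fun p => !(p.1 == h))).Perm l
  | [], h, v, _, hm => by simp at hm
  | a :: l, h, v, hnd, hm => by
      rw [List.map_cons, List.nodup_cons] at hnd
      obtain ⟨hna, hnd⟩ := hnd
      rcases List.mem_cons.mp hm with heq | hm'
      · have ha1 : a.1 = h := by rw [← heq]
        have hfl : l.filter (fun p => !(p.1 == h)) = l := by
          apply List.filter_eq_self.mpr
          intro p hp
          simp only [Bool.not_eq_true', beq_eq_false_iff_ne, ne_eq]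
          intro hpe
          have hmm : p.1 ∈ l.map (fun p => p.1) := List.mem_map_of_mem hp
          rw [hpe, ← ha1] at hmm
          exact hna hmm
        rw [List.filter_cons, if_neg (by simp [ha1]), hfl, ← heq]
      · have hne : a.1 ≠ h := by
          intro hae
          exact hna (by
            have : h ∈ l.map (fun p => p.1) := by
              exact (List.mem_map).mpr ⟨(h, v), hm', rfl⟩
            rwa [hae])
        rw [List.filter_cons]
        rw [if_pos (by simp [hne])]
        exact (List.Perm.swap a (h, v) _).trans ((pv_filter_ne_perm l h v hnd hm').cons a)

lemma pv_A_fold :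
    ∀ (ks : List Int) (d : PySem.Dict Int Int),
      d.keys.Nodup →
      ks.Pairwise (fun a b => b < a) →
      (∀ k ∈ ks, k ∈ d.keys) →
      (∀ k ∈ ks, k + 1 ∈ d.keys → k + 1 ∈ ks) →
      (ks.foldl pvStepA d).items.Perm
        (d.items.map (fun p => if p.1 ∈ ks then (p.1 + 1, p.2) else p))
  | [], d, _, _, _, _ => by simp
  | h :: t, d, hnd, hdesc, hmem, hsucc => by
      rw [List.pairwise_cons] at hdesc
      obtain ⟨hgt, hdt⟩ := hdesc
      have hk : h ∈ d.keys := hmem h (by simp)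
      have hc : d.contains h = true := (PySem.Dict.contains_iff_mem_keys d h).mpr hk
      obtain ⟨v, hget⟩ : ∃ v, d.get? h = some v := by
        cases hg : d.get? h with
        | none =>
            rw [PySem.Dict.get?_eq_none_iff_contains] at hg
            rw [hg] at hc; cases hc
        | some v => exact ⟨v, rfl⟩
      have hmemit : (h, v) ∈ d.items := PySem.Dict.mem_items_of_get?_eq_some d hget
      have hstep : pvStepA d h = (d.erase h).insert (h + 1) v := by
        simp [pvStepA, PySem.Dict.pop?, hget]
      have hh1 : h + 1 ∉ d.keys := by
        intro hmem1
        rcases List.mem_cons.mp (hsucc h (by simp) hmem1) with h1 | h1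
        · omega
        · have := hgt _ h1; omega
      have hkeys_sub : ∀ j, j ∈ (d.erase h).keys → j ∈ d.keys ∧ j ≠ h := by
        intro j hj
        simp only [PySem.Dict.keys, pv_erase_items, List.mem_map, List.mem_filter,
          Bool.not_eq_true', beq_eq_false_iff_ne, ne_eq] at hj
        obtain ⟨p, ⟨hpmem, hpne⟩, rfl⟩ := hj
        exact ⟨by simp only [PySem.Dict.keys, List.mem_map]; exact ⟨p, hpmem, rfl⟩, hpne⟩
      have hc1 : (d.erase h).contains (h + 1) = false := by
        cases hcc : (d.erase h).contains (h + 1) with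
        | false => rfl
        | true =>
            have := (hkeys_sub (h + 1) ((PySem.Dict.contains_iff_mem_keys _ _).mp hcc)).1
            exact absurd this hh1
      have hins : ((d.erase h).insert (h + 1) v).items = (d.erase h).items ++ [(h + 1, v)] :=
        PySem.Dict.items_insert_of_not_contains _ v hc1
      have hkeyssub : (d.erase h).keys.Sublist d.keys := by
        rw [PySem.Dict.keys, PySem.Dict.keys, pv_erase_items]
        exact List.filter_sublist.map _
      have hnd1 : ((d.erase h).insert (h + 1) v).keys.Nodup := by
        have hkeq : ((d.erase h).insert (h + 1) v).keys = (d.erase h).keys ++ [h + 1] := by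
          rw [PySem.Dict.keys, hins, List.map_append]; rfl
        rw [hkeq]
        refine List.Nodup.append (hnd.sublist hkeyssub) (by simp) ?_
        intro j hj hj'
        rcases List.mem_singleton.mp hj' with rfl
        exact hh1 (hkeys_sub _ hj).1
      have hmemt : ∀ k ∈ t, k ∈ ((d.erase h).insert (h + 1) v).keys := by
        intro k hkt
        have hkd : k ∈ d.keys := hmem k (List.mem_cons_of_mem _ hkt)
        have hkne : k ≠ h := by have := hgt k hkt; omega
        simp only [PySem.Dict.keys, List.mem_map] at hkd
        obtain ⟨p, hp, hpk⟩ := hkd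
        simp only [PySem.Dict.keys, hins, pv_erase_items, List.map_append, List.mem_append,
          List.mem_map, List.mem_filter, Bool.not_eq_true', beq_eq_false_iff_ne, ne_eq]
        exact Or.inl ⟨p, ⟨hp, by rw [hpk]; exact hkne⟩, hpk⟩
      have hsucct : ∀ k ∈ t, k + 1 ∈ ((d.erase h).insert (h + 1) v).keys → k + 1 ∈ t := by
        intro k hkt hk1
        have hkh : k < h := hgt k hkt
        have hkeq : ((d.erase h).insert (h + 1) v).keys = (d.erase h).keys ++ [h + 1] := by
          rw [PySem.Dict.keys, hins, List.map_append]; rfl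
        rw [hkeq, List.mem_append] at hk1
        rcases hk1 with hk1 | hk1
        · obtain ⟨hkd, hkne⟩ := hkeys_sub _ hk1
          rcases List.mem_cons.mp (hsucc k (List.mem_cons_of_mem _ hkt) hkd) with h1 | h1
          · exact absurd h1 hkne
          · exact h1
        · rcases List.mem_singleton.mp hk1 with heq
          omega
      have hIH := pv_A_fold t ((d.erase h).insert (h + 1) v) hnd1 hdt hmemt hsucct
      rw [List.foldl_cons, hstep]
      refine hIH.trans ?_
      have hh1t : h + 1 ∉ t := by intro hx; have := hgt _ hx; omega
      have hht : h ∉ t := by intro hx; have := hgt _ hx; omega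
      rw [hins, List.map_append]
      have hsing : [(h + 1, v)].map (fun p => if p.1 ∈ t then (p.1 + 1, p.2) else p) = [(h + 1, v)] := by
        simp [hh1t]
      rw [hsing]
      have hcongr : ((d.erase h).items).map (fun p => if p.1 ∈ t then (p.1 + 1, p.2) else p) =
          ((d.erase h).items).map (fun p => if p.1 ∈ h :: t then (p.1 + 1, p.2) else p) := by
        apply List.map_congr_left
        intro p hp
        have hpne : p.1 ≠ h := by
          rw [pv_erase_items, List.mem_filter] at hp
          simpa using hp.2
        simp only [List.mem_cons, hpne, false_or]
      rw [hcongr]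
      have hperm1 := pv_filter_ne_perm d.items h v hnd hmemit
      refine (List.perm_append_singleton _ _).trans ?_
      have hmapeq : ((h, v) :: (d.erase h).items).map (fun p => if p.1 ∈ h :: t then (p.1 + 1, p.2) else p) =
          (h + 1, v) :: ((d.erase h).items).map (fun p => if p.1 ∈ h :: t then (p.1 + 1, p.2) else p) := by
        simp
      rw [← hmapeq, pv_erase_items]
      exact hperm1.map _

lemma pv_update_empty (O : List (Int × Int)) (h : (O.map (fun p => p.1)).Nodup) :
    ((PySem.Dict.empty : PySem.Dict Int Int).update O).items = O := by
  have h2 : ∀ a ∈ O, (PySem.Dict.empty : PySem.Dict Int Int).contains a.1 = false := by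
    intro a _; rfl
  have hmain := PySem.Dict.items_foldl_insert_fresh O (fun p : Int × Int => p.1)
    (fun p : Int × Int => p.2) PySem.Dict.empty h2 h
  show (List.foldl (fun acc p => acc.insert p.1 p.2) (PySem.Dict.empty : PySem.Dict Int Int) O).items = O
  simpa using hmain

lemma pv_A_eq_out (dict : List (Int × Int)) (nk nv : Int)
    (hpre : (dict.map (fun p => p.1)).Nodup) :
    insert_and_shift_keys dict nk nv = pvOut dict nk nv := by
  have hkeys0 : (PySem.Dict.mk dict).keys = dict.map (fun p => p.1) := rfl
  set kf := (PySem.Dict.mk dict).keys.filter (fun k => decide (k ≥ nk)) with hkf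
  set ks := PySem.List.sorted kf (fun k => k) true with hksdef
  have hksmem : ∀ k, k ∈ ks ↔ k ∈ (PySem.Dict.mk dict).keys ∧ nk ≤ k := by
    intro k
    rw [hksdef, PySem.List.mem_sorted, hkf, List.mem_filter]
    simp [ge_iff_le]
  have hkfnodup : kf.Nodup := by
    rw [hkf, hkeys0]
    exact hpre.filter _
  have hksnodup : ks.Nodup := ((PySem.List.sorted_perm kf (fun k => k) true).symm).nodup hkfnodup
  have hdesc : ks.Pairwise (fun a b => b < a) := by
    have h1 : ks.Pairwise (fun a b => b ≤ a) := PySem.List.sorted_pairwise_rev kf (fun k => k)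
    have h2 : ks.Pairwise (fun a b => a ≠ b) := hksnodup
    exact (h1.and h2).imp (by intro a b hab; omega)
  have hmem : ∀ k ∈ ks, k ∈ (PySem.Dict.mk dict).keys := fun k hk => ((hksmem k).1 hk).1
  have hsucc : ∀ k ∈ ks, k + 1 ∈ (PySem.Dict.mk dict).keys → k + 1 ∈ ks := by
    intro k hk h1
    have := ((hksmem k).1 hk).2
    exact (hksmem (k + 1)).2 ⟨h1, by omega⟩
  have hnd0 : (PySem.Dict.mk dict).keys.Nodup := by rw [hkeys0]; exact hpre
  have hfold := pv_A_fold ks (PySem.Dict.mk dict) hnd0 hdesc hmem hsucc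
  have hremap : (PySem.Dict.mk dict).items.map (fun p => if p.1 ∈ ks then (p.1 + 1, p.2) else p) =
      dict.map (pvRemap nk) := by
    apply List.map_congr_left
    intro p hp
    have hpk : p.1 ∈ (PySem.Dict.mk dict).keys := by
      rw [hkeys0]; exact List.mem_map_of_mem hp
    by_cases hge : nk ≤ p.1
    · rw [if_pos ((hksmem p.1).2 ⟨hpk, hge⟩)]
      simp only [pvRemap, ge_iff_le]
      rw [if_pos hge]
    · rw [if_neg (by intro hx; exact hge ((hksmem p.1).1 hx).2)]
      simp only [pvRemap, ge_iff_le]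
      rw [if_neg hge]
  rw [hremap] at hfold
  set D := ks.foldl pvStepA (PySem.Dict.mk dict) with hD
  have hncont : D.contains nk = false := by
    cases hcc : D.contains nk with
    | false => rfl
    | true =>
        exfalso
        have hmemk : nk ∈ D.keys := (PySem.Dict.contains_iff_mem_keys D nk).mp hcc
        have hkperm : D.keys.Perm ((dict.map (pvRemap nk)).map (fun p => p.1)) := by
          exact hfold.map (fun p => p.1)
        have hmm : nk ∈ (dict.map (pvRemap nk)).map (fun p => p.1) := hkperm.mem_iff.mp hmemk
        rw [List.map_map, List.mem_map] at hmm
        obtain ⟨a, ha, heq⟩ := hmm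
        simp only [Function.comp_apply] at heq
        by_cases hge : a.1 ≥ nk
        · rw [show pvRemap nk a = (a.1 + 1, a.2) from by simp [pvRemap, hge]] at heq
          simp at heq; omega
        · rw [show pvRemap nk a = a from by simp [pvRemap, hge]] at heq
          omega
  have hitems : (D.insert nk nv).items = D.items ++ [(nk, nv)] :=
    PySem.Dict.items_insert_of_not_contains D nv hncont
  have hOperm := pv_out_perm dict nk nv hpre
  have hOpw := pv_out_pairwise dict nk nv hpre
  have hApermO : (D.insert nk nv).items.Perm (pvOut dict nk nv) := by
    rw [hitems]
    exact (hfold.append_right [(nk, nv)]).trans hOperm.symm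
  have hOfstnodup : ((pvOut dict nk nv).map (fun p => p.1)).Nodup := by
    exact List.pairwise_map.mpr (hOpw.imp (fun hab => by omega))
  have hItemsNodup : (((D.insert nk nv).items).map (fun p => p.1)).Nodup :=
    ((hApermO.map (fun p => p.1)).symm).nodup hOfstnodup
  have hsorted : PySem.List.sorted2 ((D.insert nk nv).items) (fun p => p.1) (fun p => p.2) =
      pvOut dict nk nv :=
    pv_sorted2_eq_of_perm_of_pairwise _ _ hItemsNodup hApermO.symm hOpw
  rw [pv_A_unfold, ← hkf, ← hksdef, ← hD, hsorted]
  exact pv_update_empty _ hOfstnodup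

-- ===== VERDICT (by name: the statement is the Claim_ definition above) =====
theorem insert_and_shift_keys_spec : Claim_equal_insert_and_shift_keys := by
  intro dict nk nv _hdom hpre
  unfold Spec_insert_and_shift_keys
  rw [pv_A_eq_out dict nk nv hpre, pv_B_eq_out dict nk nv hpre]
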